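-- pv_equiv track=rewrite | github.com/jakemiller13/MC_Scripts | mc-adding-generators-panels/Adding_Generators_Panels.py | get_generator
-- ===== SOURCE A (Python) =====
-- def get_generator(panel):
--     '''
--     Returns Generator based on panel. If panel not in generator_list, returns panel = "Other":
--         returns: panel, generator
--     NOTE: MasterControl incorrectly lists as "UP2", -NOT- "UPS2"
--     '''
--     generator_list = {'G1':['SBDP2', 'SBP3', 'SBP4', 'UP2'],
--                       'G2':['EP8A', 'UP1'],
--                       'G3':['SBDP1', 'SBP1', 'SBP2', 'EP8']}
--     for generator in generator_list:
--         if panel in generator_list[generator]: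
--             return panel, generator
--         elif panel == 'N/A':
--             return panel, ''
--     return 'Other', ''
-- ===== SOURCE B (Python) =====
-- def get_generator(panel):
--     '''
--     Returns Generator based on panel. If panel not in generator_list, returns panel = "Other":
--         returns: panel, generator
--     '''
--     generator_list = {'G1':['SBDP2', 'SBP3', 'SBP4', 'UP2'],
--                       'G2':['EP8A', 'UP1'],
--                       'G3':['SBDP1', 'SBP1', 'SBP2', 'EP8']}
--     reverse = {p: g for g, panels in generator_list.items() for p in panels}
--     if panel in reverse:
--         return panel, reverse[panel]
--     elif panel == 'N/A':
--         return panel, ''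
--     else:
--         return 'Other', ''
-- ===== Notes on version B (the rewrite author's own statement) =====
-- stated objective: simpler
-- what changed: Replaces the group-by-group membership scan (with the N/A check buried inside the loop) with a precomputed reverse index panel->generator followed by one direct lookup and a flat if/elif/else.
import Mathlib
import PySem

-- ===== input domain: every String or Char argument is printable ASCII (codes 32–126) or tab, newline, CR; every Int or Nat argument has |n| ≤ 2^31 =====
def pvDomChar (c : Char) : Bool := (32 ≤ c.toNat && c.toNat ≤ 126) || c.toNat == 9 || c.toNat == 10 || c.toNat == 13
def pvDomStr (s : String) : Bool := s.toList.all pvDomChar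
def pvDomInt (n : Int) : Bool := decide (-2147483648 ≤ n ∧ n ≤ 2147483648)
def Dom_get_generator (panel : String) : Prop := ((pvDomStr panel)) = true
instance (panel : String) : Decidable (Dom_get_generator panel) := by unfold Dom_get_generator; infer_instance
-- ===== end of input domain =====

-- B replaces A's group-by-group membership scan with a precomputed reverse index (panel → generator)
-- and a single lookup; return values are identical (objective: simpler).

-- ===== PORT A =====
-- the literal dict from A, as an insertion-ordered association list
def pvGenList : List (String × List String) :=
  [("G1", ["SBDP2", "SBP3", "SBP4", "UP2"]),
   ("G2", ["EP8A", "UP1"]),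
   ("G3", ["SBDP1", "SBP1", "SBP2", "EP8"])]

-- A's 'for generator in generator_list' loop with its early returns
def pvLoopA (panel : String) : List (String × List String) → Option (String × String)
  | [] => none
  | (g, ps) :: rest =>
      if ps.contains panel then some (panel, g)
      else if panel == "N/A" then some (panel, "")
      else pvLoopA panel rest

def get_generator (panel : String) : String × String :=
  match pvLoopA panel pvGenList with
  | some r => r
  | none => ("Other", "")

-- ===== PORT B =====
-- reverse = {p: g for g, panels in generator_list.items() for p in panels}
def pvGenListB : List (String × List String) :=
  [("G1", ["SBDP2", "SBP3", "SBP4", "UP2"]),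
   ("G2", ["EP8A", "UP1"]),
   ("G3", ["SBDP1", "SBP1", "SBP2", "EP8"])]

def pvReverse : PySem.Dict String String :=
  PySem.Dict.ofList (pvGenListB.flatMap (fun gp => gp.2.map (fun p => (p, gp.1))))

def get_generator_alt (panel : String) : String × String :=
  match pvReverse.get? panel with
  | some g => (panel, g)
  | none => if panel == "N/A" then (panel, "") else ("Other", "")

-- ===== PRECONDITION & SPEC =====
def Spec_get_generator (panel : String) (out : String × String) : Prop := out = get_generator_alt panel
instance (panel : String) (out : String × String) : Decidable (Spec_get_generator panel out) := by unfold Spec_get_generator; infer_instance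

-- ===== CLAIM (what is proved, stated in full; the proofs are below) =====
def Claim_equal_get_generator : Prop := ∀ (panel : String), Dom_get_generator panel → Spec_get_generator panel (get_generator panel)

-- ===== LEMMAS AND PROOFS =====

-- ===== VERDICT (by name: the statement is the Claim_ definition above) =====
theorem get_generator_spec : Claim_equal_get_generator := by
  intro panel _
  unfold Spec_get_generator
  by_cases h1 : panel = "SBDP2"
  · subst h1; decide
  by_cases h2 : panel = "SBP3"
  · subst h2; decide
  by_cases h3 : panel = "SBP4"
  · subst h3; decide
  by_cases h4 : panel = "UP2"
  · subst h4; decide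
  by_cases h5 : panel = "EP8A"
  · subst h5; decide
  by_cases h6 : panel = "UP1"
  · subst h6; decide
  by_cases h7 : panel = "SBDP1"
  · subst h7; decide
  by_cases h8 : panel = "SBP1"
  · subst h8; decide
  by_cases h9 : panel = "SBP2"
  · subst h9; decide
  by_cases h10 : panel = "EP8"
  · subst h10; decide
  by_cases h11 : panel = "N/A"
  · subst h11; decide
  have g1 : ¬("SBDP2" = panel) := fun h => h1 h.symm
  have g2 : ¬("SBP3" = panel) := fun h => h2 h.symm
  have g3 : ¬("SBP4" = panel) := fun h => h3 h.symm
  have g4 : ¬("UP2" = panel) := fun h => h4 h.symm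
  have g5 : ¬("EP8A" = panel) := fun h => h5 h.symm
  have g6 : ¬("UP1" = panel) := fun h => h6 h.symm
  have g7 : ¬("SBDP1" = panel) := fun h => h7 h.symm
  have g8 : ¬("SBP1" = panel) := fun h => h8 h.symm
  have g9 : ¬("SBP2" = panel) := fun h => h9 h.symm
  have g10 : ¬("EP8" = panel) := fun h => h10 h.symm
  have hrev : pvReverse = PySem.Dict.mk
      [("SBDP2", "G1"), ("SBP3", "G1"), ("SBP4", "G1"), ("UP2", "G1"),
       ("EP8A", "G2"), ("UP1", "G2"),
       ("SBDP1", "G3"), ("SBP1", "G3"), ("SBP2", "G3"), ("EP8", "G3")] := by decide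
  simp_all [get_generator, get_generator_alt, pvLoopA, pvGenList, PySem.Dict.get?]
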